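-- pv_equiv track=rewrite | github.com/mirqwa/coderbyte-solutions | medium/number_encoding.py | number_encoding
-- ===== SOURCE A (Python) =====
-- import string
--
-- def number_encoding(strValue):
--     alphabet = string.ascii_lowercase
--     result = ""
--     for char in strValue:
--         if char.lower() in alphabet:
--             result += str(alphabet.index(char.lower()) + 1)
--         else:
--             result += char
--     return result
-- ===== SOURCE B (Python) =====
-- import string
--
-- def number_encoding(strValue):
--     # Divide and conquer over string halves; a letter's position is computed
--     # arithmetically from its code point ((ord(c) | 32) - 96), no alphabet scan.
--     def enc(lo, hi):
--         if hi - lo == 0: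
--             return ""
--         if hi - lo == 1:
--             c = strValue[lo]
--             o = ord(c) | 32
--             return str(o - 96) if 97 <= o <= 122 else c
--         mid = (lo + hi) // 2
--         return enc(lo, mid) + enc(mid, hi)
--     return enc(0, len(strValue))
-- ===== Notes on version B (the rewrite author's own statement) =====
-- stated objective: alternative
-- what changed: Replaces the left-to-right loop with branch, alphabet.index scan and += accumulation by a divide-and-conquer recursion over string halves whose leaf computes a letter's position arithmetically from its code point ((ord(c)|32)-96).
import Mathlib
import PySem

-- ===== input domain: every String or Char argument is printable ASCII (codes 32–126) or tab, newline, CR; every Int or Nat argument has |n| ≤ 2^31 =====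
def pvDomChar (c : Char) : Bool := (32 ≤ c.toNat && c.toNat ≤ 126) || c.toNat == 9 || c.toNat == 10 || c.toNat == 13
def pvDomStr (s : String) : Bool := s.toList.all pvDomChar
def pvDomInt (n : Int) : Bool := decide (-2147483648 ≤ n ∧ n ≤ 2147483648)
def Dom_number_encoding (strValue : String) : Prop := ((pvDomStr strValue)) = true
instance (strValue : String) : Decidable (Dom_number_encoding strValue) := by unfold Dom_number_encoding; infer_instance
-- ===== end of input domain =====

set_option maxRecDepth 8000


-- B: divide-and-conquer over string halves with an arithmetic code-point position, instead of A's loop with alphabet scan.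

-- ===== PORT A =====
def pvAlphabet : List Char := "abcdefghijklmnopqrstuvwxyz".toList

def number_encoding (strValue : String) : String :=
  String.ofList (strValue.toList.foldl (fun result ch =>
    let lc := PySem.Chars.lowerChar ch
    if lc ∈ pvAlphabet then
      result ++ PySem.Int.toChars (((PySem.List.index? pvAlphabet lc).getD 0 : Int) + 1)
    else
      result ++ [ch]) [])

-- ===== PORT B =====
-- leaf of the recursion: str(o-96) if 97 <= o <= 122 else c, with o = ord(c) | 32
def pvEncChar (c : Char) : List Char :=
  let o : Nat := c.toNat ||| 32
  if 97 ≤ o ∧ o ≤ 122 then PySem.Int.toChars ((o : Int) - 96) else [c]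

-- enc(lo, hi): empty / single character / concatenation of the two halves
def pvEncRange (chars : List Char) (lo hi : Nat) : List Char :=
  if hi - lo = 0 then []
  else if hi - lo = 1 then pvEncChar (chars.getD lo ' ')
  else
    let mid := (lo + hi) / 2
    pvEncRange chars lo mid ++ pvEncRange chars mid hi
termination_by hi - lo
decreasing_by all_goals omega

def number_encoding_alt (strValue : String) : String :=
  String.ofList (pvEncRange strValue.toList 0 strValue.toList.length)

-- ===== PRECONDITION & SPEC =====
def Spec_number_encoding (strValue : String) (out : String) : Prop := out = number_encoding_alt strValue
instance (strValue : String) (out : String) : Decidable (Spec_number_encoding strValue out) := by unfold Spec_number_encoding; infer_instance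

-- ===== CLAIM (what is proved, stated in full; the proofs are below) =====
def Claim_equal_number_encoding : Prop := ∀ (strValue : String), Dom_number_encoding strValue → Spec_number_encoding strValue (number_encoding strValue)

-- ===== LEMMAS AND PROOFS =====

-- A's loop body as a chunk function
def pvChunkA (ch : Char) : List Char :=
  let lc := PySem.Chars.lowerChar ch
  if lc ∈ pvAlphabet then
    PySem.Int.toChars (((PySem.List.index? pvAlphabet lc).getD 0 : Int) + 1)
  else [ch]

lemma foldA_eq (l : List Char) (acc : List Char) :
    l.foldl (fun result ch =>
      let lc := PySem.Chars.lowerChar ch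
      if lc ∈ pvAlphabet then
        result ++ PySem.Int.toChars (((PySem.List.index? pvAlphabet lc).getD 0 : Int) + 1)
      else
        result ++ [ch]) acc = acc ++ l.flatMap pvChunkA := by
  induction l generalizing acc with
  | nil => simp
  | cons x t ih =>
    simp only [List.foldl_cons, List.flatMap_cons, ih, pvChunkA]
    split <;> simp

-- B's divide-and-conquer equals a flatMap of its leaf over the slice
lemma encRange_eq (chars : List Char) (lo hi : Nat) (hlo : lo ≤ hi) (hhi : hi ≤ chars.length) :
    pvEncRange chars lo hi = ((chars.drop lo).take (hi - lo)).flatMap pvEncChar := by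
  fun_induction pvEncRange chars lo hi with
  | case1 lo hi h0 =>
    simp [h0]
  | case2 lo hi h0 h1 =>
    have hlt : lo < chars.length := by omega
    rw [h1, List.drop_eq_getElem_cons hlt, List.take_succ_cons, List.take_zero,
      List.getD_eq_getElem chars ' ' hlt, List.flatMap_cons, List.flatMap_nil, List.append_nil]
  | case3 lo hi h0 h1 mid ih1 ih2 =>
    have h2 : 2 ≤ hi - lo := by omega
    rw [ih1 (by omega) (by omega), ih2 (by omega) (by omega)]
    have hsplit : hi - lo = (mid - lo) + (hi - mid) := by omega
    rw [hsplit, List.take_add, List.flatMap_append, List.drop_drop]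
    have hm : lo + (mid - lo) = mid := by omega
    rw [hm]

-- the two leaves agree on every domain character (checked over all 127 codes)
lemma chunk_eq_fin : ∀ n : Fin 127,
    pvChunkA (Char.ofNat n.val) = pvEncChar (Char.ofNat n.val) := by
  decide

lemma chunk_eq (c : Char) (h : pvDomChar c = true) : pvChunkA c = pvEncChar c := by
  have hlt : c.toNat < 127 := by
    simp [pvDomChar] at h; omega
  have := chunk_eq_fin ⟨c.toNat, hlt⟩
  simpa [Char.ofNat_toNat] using this

lemma flatMap_congr (l : List Char) (h : ∀ c ∈ l, pvDomChar c = true) :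
    l.flatMap pvChunkA = l.flatMap pvEncChar := by
  induction l with
  | nil => rfl
  | cons x t ih =>
    simp only [List.flatMap_cons]
    rw [chunk_eq x (h x (List.mem_cons_self)), ih (fun c hc => h c (List.mem_cons_of_mem _ hc))]

-- ===== VERDICT (by name: the statement is the Claim_ definition above) =====
theorem number_encoding_spec : Claim_equal_number_encoding := by
  intro s hdom
  unfold Spec_number_encoding number_encoding number_encoding_alt
  rw [foldA_eq, encRange_eq _ _ _ (Nat.zero_le _) le_rfl, flatMap_congr]
  · simp [List.take_of_length_le]
  · intro c hc
    simp only [Dom_number_encoding, pvDomStr, List.all_eq_true] at hdom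
    exact hdom c (by simpa using hc)
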